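-- pv_equiv track=rewrite | github.com/ftmzhrasafaei/sudoku-solver | sudoku-solver.py | AllMin
-- ===== SOURCE A (Python) =====
-- def MinInTable(t):
--     mint = t[0][0]
--     pos = (0 , 0)
--     for i in range(len(t)):
--         for j in range(len(t[0])):
--             if t[i][j] < mint :
--                 mint = t[i][j]
--                 pos = (i , j)
--     return pos
--
-- def AllMin(t):
--     m1 , m2 = MinInTable(t)
--     m = t[m1][m2]
--     mins = []
--     for i in range(len(t)):
--         for j in range(len(t[0])):
--             if t[i][j] == m:
--                 mins.append((i, j))
--     return mins
-- ===== SOURCE B (Python) =====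
-- def AllMin(t):
--     w = len(t[0])
--     best = t[0][0]
--     mins = []
--     for i, row in enumerate(t):
--         for j, v in enumerate(row[:w]):
--             if v < best:
--                 best = v
--                 mins = [(i, j)]
--             elif v == best:
--                 mins.append((i, j))
--     return mins
-- ===== Notes on version B (the rewrite author's own statement) =====
-- stated objective: alternative
-- what changed: Replaces A's two full passes (one scan to find the minimum, a second scan to collect its positions) by a single row-major pass that maintains the current minimum together with the running list of its positions, resetting the list when a strictly smaller value appears.
import Mathlib
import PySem

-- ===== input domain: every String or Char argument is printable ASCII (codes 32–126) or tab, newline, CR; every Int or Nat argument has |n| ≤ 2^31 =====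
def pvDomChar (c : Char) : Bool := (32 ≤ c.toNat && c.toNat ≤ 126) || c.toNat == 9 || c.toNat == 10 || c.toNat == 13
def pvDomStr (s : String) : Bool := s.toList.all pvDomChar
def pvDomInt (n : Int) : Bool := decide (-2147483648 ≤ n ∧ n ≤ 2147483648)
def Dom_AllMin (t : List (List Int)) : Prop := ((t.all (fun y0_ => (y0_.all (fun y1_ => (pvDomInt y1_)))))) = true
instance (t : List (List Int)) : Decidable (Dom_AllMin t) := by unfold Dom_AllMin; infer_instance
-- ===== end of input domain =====

-- B replaces A's two full passes (find the minimum, then collect its positions) by one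
-- row-major pass maintaining the current minimum and the running list of its positions.

-- ===== PORT A =====
-- t[i][j] (both indexes are in range on every admitted input; the default is never read there)
def pvCell (t : List (List Int)) (i j : Int) : Int :=
  PySem.List.pyGetD (PySem.List.pyGetD t i []) j 0

def MinInTable (t : List (List Int)) : Int × Int :=
  ((PySem.List.pyRange 0 (PySem.List.len t) 1).foldl (fun s i =>
    (PySem.List.pyRange 0 (PySem.List.len (PySem.List.pyGetD t 0 [])) 1).foldl (fun s j =>
      if pvCell t i j < s.1 then (pvCell t i j, (i, j)) else s) s)
    (pvCell t 0 0, ((0 : Int), (0 : Int)))).2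

def AllMin (t : List (List Int)) : List (Int × Int) :=
  let p := MinInTable t
  let m := pvCell t p.1 p.2
  (PySem.List.pyRange 0 (PySem.List.len t) 1).foldl (fun acc i =>
    (PySem.List.pyRange 0 (PySem.List.len (PySem.List.pyGetD t 0 [])) 1).foldl (fun acc j =>
      if pvCell t i j = m then acc ++ [(i, j)] else acc) acc) []

-- ===== PORT B =====
def AllMin_alt (t : List (List Int)) : List (Int × Int) :=
  let w := PySem.List.len (PySem.List.pyGetD t 0 [])      -- w = len(t[0])
  let best := pvCell t 0 0                                 -- best = t[0][0]
  ((PySem.List.enumerate t).foldl (fun s p =>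
    (PySem.List.enumerate (PySem.List.slice p.2 none (some w))).foldl (fun s q =>
      if q.2 < s.1 then (q.2, [(p.1, q.1)])
      else if q.2 = s.1 then (s.1, s.2 ++ [(p.1, q.1)])
      else s) s) (best, ([] : List (Int × Int)))).2

-- ===== PRECONDITION & SPEC =====
-- A raises IndexError on an empty table, an empty first row, or a row shorter than the
-- first row (it indexes every row at all positions below len(t[0])); exactly those are excluded.
def Pre_AllMin (t : List (List Int)) : Prop :=
  t ≠ [] ∧ PySem.List.pyGetD t 0 [] ≠ [] ∧
    ∀ row ∈ t, (PySem.List.pyGetD t 0 []).length ≤ row.length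

instance (t : List (List Int)) : Decidable (Pre_AllMin t) := by unfold Pre_AllMin; infer_instance

def pvWitness_AllMin : List (List Int) := [[3, 1], [1, 2]]

def Spec_AllMin (t : List (List Int)) (out : List (Int × Int)) : Prop := out = AllMin_alt t
instance (t : List (List Int)) (out : List (Int × Int)) : Decidable (Spec_AllMin t out) := by unfold Spec_AllMin; infer_instance

-- ===== CLAIM (what is proved, stated in full; the proofs are below) =====
def Claim_equal_AllMin : Prop := ∀ (t : List (List Int)), Dom_AllMin t → Pre_AllMin t → Spec_AllMin t (AllMin t)

-- ===== LEMMAS AND PROOFS =====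

-- row-major list of ((i,j), t[i][j]) for i < len t, j < len t[0]
def pvCells (t : List (List Int)) : List ((Int × Int) × Int) :=
  (PySem.List.enumerate t).flatMap (fun p =>
    (PySem.List.enumerate (p.2.take (PySem.List.pyGetD t 0 []).length)).map
      (fun q => ((p.1, q.1), q.2)))

def pvMin (t : List (List Int)) : Int :=
  (pvCells t).foldl (fun m c => min m c.2) (pvCell t 0 0)

lemma pvMinFold_le (l : List ((Int × Int) × Int)) (b : Int) :
    l.foldl (fun m c => min m c.2) b ≤ b := by
  induction l generalizing b with
  | nil => simp
  | cons c rest ih => exact le_trans (ih (min b c.2)) (min_le_left _ _)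

-- characterization of B's one-pass fold
lemma foldB_char (l : List ((Int × Int) × Int)) (b : Int) (acc : List (Int × Int)) :
    l.foldl (fun s c =>
      if c.2 < s.1 then (c.2, [c.1])
      else if c.2 = s.1 then (s.1, s.2 ++ [c.1])
      else s) (b, acc)
    = (l.foldl (fun m c => min m c.2) b,
       (if b ≤ l.foldl (fun m c => min m c.2) b then acc else []) ++
         (l.filter (fun c => c.2 == l.foldl (fun m c => min m c.2) b)).map (·.1)) := by
  induction l generalizing b acc with
  | nil => simp
  | cons c rest ih =>
    have hle : rest.foldl (fun m c => min m c.2) (min b c.2) ≤ min b c.2 := pvMinFold_le _ _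
    simp only [List.foldl_cons, List.filter_cons]
    rcases lt_trichotomy c.2 b with h | h | h
    · rw [if_pos h, ih]
      have hmin : min b c.2 = c.2 := min_eq_right h.le
      rw [hmin] at hle
      simp only [hmin]
      by_cases h2 : c.2 ≤ rest.foldl (fun m c => min m c.2) c.2
      · have he : c.2 = rest.foldl (fun m c => min m c.2) c.2 := le_antisymm h2 hle
        simp [← he, not_le.mpr h]
      · have hne : ¬ (c.2 == rest.foldl (fun m c => min m c.2) c.2) = true := by
          simp only [beq_iff_eq]; intro he; exact h2 he.le
        have hb : ¬ b ≤ rest.foldl (fun m c => min m c.2) c.2 := by omega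
        simp [h2, hne, hb]
    · rw [if_neg (by omega), if_pos h, ih]
      have hmin : min b c.2 = b := min_eq_left h.ge
      rw [hmin] at hle
      simp only [hmin]
      by_cases h2 : b ≤ rest.foldl (fun m c => min m c.2) b
      · have he : (c.2 == rest.foldl (fun m c => min m c.2) b) = true := by
          simp only [beq_iff_eq]; omega
        simp [h2, he]
      · have hne : ¬ (c.2 == rest.foldl (fun m c => min m c.2) b) = true := by
          simp only [beq_iff_eq]; omega
        simp [h2, hne]
    · rw [if_neg (by omega), if_neg (by omega), ih]
      have hmin : min b c.2 = b := min_eq_left h.le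
      rw [hmin] at hle
      simp only [hmin]
      have hne : ¬ (c.2 == rest.foldl (fun m c => min m c.2) b) = true := by
        simp only [beq_iff_eq]; omega
      simp [hne]

-- A's first pass: the running minimum value
lemma foldA_fst (l : List ((Int × Int) × Int)) (b : Int) (p : Int × Int) :
    (l.foldl (fun s c => if c.2 < s.1 then (c.2, c.1) else s) (b, p)).1
      = l.foldl (fun m c => min m c.2) b := by
  induction l generalizing b p with
  | nil => rfl
  | cons c rest ih =>
    simp only [List.foldl_cons]
    by_cases h : c.2 < b
    · rw [if_pos h, ih, min_eq_right h.le]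
    · rw [if_neg h, ih, min_eq_left (by omega)]

-- A's first pass: the kept position always holds the kept value
lemma foldA_snd (f : Int × Int → Int) (l : List ((Int × Int) × Int)) (b : Int) (p : Int × Int)
    (hb : f p = b) (hl : ∀ c ∈ l, f c.1 = c.2) :
    f (l.foldl (fun s c => if c.2 < s.1 then (c.2, c.1) else s) (b, p)).2
      = (l.foldl (fun s c => if c.2 < s.1 then (c.2, c.1) else s) (b, p)).1 := by
  induction l generalizing b p with
  | nil => simpa using hb
  | cons c rest ih =>
    simp only [List.foldl_cons]
    by_cases h : c.2 < b
    · rw [if_pos h]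
      exact ih _ _ (hl c (by simp)) (fun d hd => hl d (by simp [hd]))
    · rw [if_neg h]
      exact ih _ _ hb (fun d hd => hl d (by simp [hd]))

lemma cells_consistent (t : List (List Int)) :
    ∀ c ∈ pvCells t, pvCell t c.1.1 c.1.2 = c.2 := by
  intro c hc
  unfold pvCells at hc
  simp only [List.mem_flatMap, List.mem_map] at hc
  obtain ⟨p, hp, q, hq, rfl⟩ := hc
  rw [PySem.List.mem_enumerate_iff] at hp hq
  obtain ⟨k, hk, rfl⟩ := hp
  obtain ⟨l, hl, rfl⟩ := hq
  simp only [List.length_take, lt_min_iff] at hl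
  have hlw : l < (PySem.List.pyGetD t 0 []).length := hl.1
  have hlk : l < t[k].length := hl.2
  unfold pvCell
  simp only [zero_add]
  rw [PySem.List.pyGetD_natCast, PySem.List.pyGetD_natCast,
    List.getD_eq_getElem t [] hk, List.getD_eq_getElem _ 0 hlk, List.getElem_take]

-- the nested range loop of A, cell by cell, is the fold over pvCells
lemma bridge {S : Type} (t : List (List Int)) (hpre : Pre_AllMin t)
    (F : S → ((Int × Int) × Int) → S) (init : S) :
    (PySem.List.pyRange 0 (PySem.List.len t) 1).foldl (fun s i =>
      (PySem.List.pyRange 0 (PySem.List.len (PySem.List.pyGetD t 0 [])) 1).foldl (fun s j =>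
        F s ((i, j), pvCell t i j)) s) init
    = (pvCells t).foldl F init := by
  unfold pvCells
  rw [List.foldl_flatMap]
  simp only [List.foldl_map]
  rw [PySem.List.enumerate_eq_map_pyRange t ([] : List Int), List.foldl_map]
  apply PySem.List.foldl_congr_mem
  intro s i hi
  rw [PySem.List.mem_pyRange_one] at hi
  have hiN : i.toNat < t.length := by
    have := PySem.List.len_eq t; omega
  have hrow : PySem.List.pyGetD t i [] = t[i.toNat] :=
    PySem.List.pyGetD_eq_getElem t [] hi.1 (by simpa [PySem.List.len_eq] using hi.2)
  have hmem : PySem.List.pyGetD t i [] ∈ t := by rw [hrow]; exact List.getElem_mem _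
  have hw : (PySem.List.pyGetD t 0 []).length ≤ (PySem.List.pyGetD t i []).length :=
    hpre.2.2 _ hmem
  rw [PySem.List.enumerate_eq_map_pyRange _ (0 : Int), List.foldl_map]
  have hlen2 : PySem.List.len ((PySem.List.pyGetD t i []).take (PySem.List.pyGetD t 0 []).length)
      = PySem.List.len (PySem.List.pyGetD t 0 []) := by
    rw [PySem.List.len_eq, PySem.List.len_eq, List.length_take]
    omega
  rw [hlen2]
  apply PySem.List.foldl_congr_mem
  intro s j hj
  rw [PySem.List.mem_pyRange_one] at hj
  have hjlt : j < ((PySem.List.pyGetD t 0 []).length : Int) := by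
    have := hj.2
    rwa [PySem.List.len_eq] at this
  have h1 : PySem.List.pyGetD ((PySem.List.pyGetD t i []).take (PySem.List.pyGetD t 0 []).length) j 0
      = ((PySem.List.pyGetD t i []).take (PySem.List.pyGetD t 0 []).length)[j.toNat]'(by
        rw [List.length_take]; omega) :=
    PySem.List.pyGetD_eq_getElem _ 0 hj.1 (by rw [List.length_take]; push_cast; omega)
  have h2 : pvCell t i j = (PySem.List.pyGetD t i [])[j.toNat]'(by omega) := by
    unfold pvCell
    exact PySem.List.pyGetD_eq_getElem _ 0 hj.1 (by omega)
  rw [h1, h2, List.getElem_take]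

lemma A_eq (t : List (List Int)) (hpre : Pre_AllMin t) :
    AllMin t = ((pvCells t).filter (fun c => c.2 == pvMin t)).map (·.1) := by
  have hbr1 := bridge t hpre (fun s c => if c.2 < s.1 then (c.2, c.1) else s)
    (pvCell t 0 0, ((0 : Int), (0 : Int)))
  have hMIT : MinInTable t
      = ((pvCells t).foldl (fun s c => if c.2 < s.1 then (c.2, c.1) else s)
          (pvCell t 0 0, ((0 : Int), (0 : Int)))).2 := by
    unfold MinInTable
    exact congrArg Prod.snd hbr1
  have hm : pvCell t (MinInTable t).1 (MinInTable t).2 = pvMin t := by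
    rw [hMIT]
    have h := foldA_snd (fun p => pvCell t p.1 p.2) (pvCells t) (pvCell t 0 0)
      ((0 : Int), (0 : Int)) rfl (cells_consistent t)
    simp only at h
    rw [h, foldA_fst]
    rfl
  show (PySem.List.pyRange 0 (PySem.List.len t) 1).foldl (fun acc i =>
      (PySem.List.pyRange 0 (PySem.List.len (PySem.List.pyGetD t 0 [])) 1).foldl (fun acc j =>
        if pvCell t i j = pvCell t (MinInTable t).1 (MinInTable t).2 then acc ++ [(i, j)] else acc) acc) []
    = ((pvCells t).filter (fun c => c.2 == pvMin t)).map (·.1)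
  rw [hm]
  have hbr2 := bridge t hpre
    (fun acc c => if c.2 = pvMin t then acc ++ [c.1] else acc) ([] : List (Int × Int))
  rw [hbr2]
  have hfi := PySem.List.foldl_append_ite (p := fun (c : (Int × Int) × Int) => c.2 = pvMin t)
    (f := fun c => c.1) (pvCells t) ([] : List (Int × Int))
  rw [List.nil_append] at hfi
  rw [hfi]
  congr 1

lemma B_eq (t : List (List Int)) :
    AllMin_alt t = ((pvCells t).filter (fun c => c.2 == pvMin t)).map (·.1) := by
  have hB : AllMin_alt t
      = ((pvCells t).foldl (fun s c =>
          if c.2 < s.1 then (c.2, [c.1])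
          else if c.2 = s.1 then (s.1, s.2 ++ [c.1])
          else s) (pvCell t 0 0, ([] : List (Int × Int)))).2 := by
    unfold AllMin_alt pvCells
    rw [List.foldl_flatMap]
    simp only [List.foldl_map, PySem.List.len_eq, PySem.List.slice_to_natCast]
  rw [hB, foldB_char]
  simp only [ite_self, List.nil_append]
  rfl

-- ===== VERDICT (by name: the statement is the Claim_ definition above) =====
theorem AllMin_spec : Claim_equal_AllMin := by
  intro t _ hpre
  unfold Spec_AllMin
  rw [A_eq t hpre, B_eq t]
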